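-- pv_equiv track=rewrite | github.com/matheuspercario/python-mit | final_test/question-04.py | map_freqs
-- ===== SOURCE A (Python) =====
-- def map_freqs(s):
--     """
--     s é uma string não-vazia de caracteres
--     Retorna um dicionário que mapeia cada caractere em s que
--     é um dígito (0-9) ao número de vezes que ele ocorre em s.
--     """
--     d = {}
--     for char in s:
--         if char.isdigit():
--             if char not in d:
--                 d[char] = 1
--             else:
--                 d[char] = d[char] + 1
--     return d
-- ===== SOURCE B (Python) =====
-- def map_freqs(s):
--     digits = [c for c in s if c.isdigit()]
--     return {c: digits.count(c) for c in dict.fromkeys(digits)}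
-- ===== Notes on version B (the rewrite author's own statement) =====
-- stated objective: alternative
-- what changed: Replaces A's single-pass dict accumulation (membership test then insert-or-increment per character) by filter-once, dedup the digit characters in first-occurrence order, and count each distinct digit with list.count.
import Mathlib
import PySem

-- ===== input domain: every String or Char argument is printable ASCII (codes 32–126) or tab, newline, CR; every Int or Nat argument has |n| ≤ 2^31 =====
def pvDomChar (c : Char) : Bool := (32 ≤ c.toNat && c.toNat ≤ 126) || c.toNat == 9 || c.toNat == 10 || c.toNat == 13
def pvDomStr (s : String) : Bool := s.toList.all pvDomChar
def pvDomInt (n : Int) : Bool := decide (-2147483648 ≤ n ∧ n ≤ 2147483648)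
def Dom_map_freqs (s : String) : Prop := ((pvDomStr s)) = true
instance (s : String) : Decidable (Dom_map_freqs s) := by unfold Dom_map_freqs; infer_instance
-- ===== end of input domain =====

-- B replaces A's single-pass insert-or-increment dict accumulation by filter + dedup + per-key count (alternative decomposition, similar cost).
-- ===== PORT A =====
def map_freqs (s : String) : List (String × Int) :=
  (s.toList.foldl
    (fun d char =>
      if PySem.Chars.isdigit char then
        if ¬ (PySem.Dict.contains d (String.ofList [char])) then
          PySem.Dict.insert d (String.ofList [char]) 1
        else
          PySem.Dict.insert d (String.ofList [char]) (PySem.Dict.getD d (String.ofList [char]) 0 + 1)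
      else d)
    PySem.Dict.empty).items

-- ===== PORT B =====
def map_freqs_alt (s : String) : List (String × Int) :=
  let digits := s.toList.filter (fun c => PySem.Chars.isdigit c)
  (PySem.List.dedup digits).map (fun c => (String.ofList [c], (digits.count c : Int)))

-- ===== PRECONDITION & SPEC =====
def Spec_map_freqs (s : String) (out : List (String × Int)) : Prop := out = map_freqs_alt s
instance (s : String) (out : List (String × Int)) : Decidable (Spec_map_freqs s out) := by unfold Spec_map_freqs; infer_instance

-- ===== CLAIM (what is proved, stated in full; the proofs are below) =====
def Claim_equal_map_freqs : Prop := ∀ (s : String), Dom_map_freqs s → Spec_map_freqs s (map_freqs s)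

-- ===== LEMMAS AND PROOFS =====
theorem singleChar_inj : Function.Injective (fun c => String.ofList [c]) := by
  intro a b h
  have := congrArg String.toList h
  simp at this; exact this

theorem ofList_map_single (xs : List Char) :
    PySem.Set.ofList (xs.map (fun c => String.ofList [c])) =
      (PySem.Set.ofList xs).map (fun c => String.ofList [c]) := by
  induction xs using List.reverseRecOn with
  | nil => rfl
  | append_singleton xs x ih =>
      rw [List.map_append, List.map_singleton, PySem.Set.ofList_append_singleton,
          PySem.Set.ofList_append_singleton, ih]
      rw [PySem.Set.add_eq_ite, PySem.Set.add_eq_ite]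
      by_cases hx : x ∈ PySem.Set.ofList xs
      · simp only [if_pos hx, if_pos (List.mem_map.mpr ⟨x, hx, rfl⟩)]
      · have hnx : String.ofList [x] ∉ (PySem.Set.ofList xs).map (fun c => String.ofList [c]) := by
          intro hmem
          obtain ⟨y, hy, hyx⟩ := List.mem_map.mp hmem
          exact hx (singleChar_inj hyx ▸ hy)
        rw [if_neg hx, if_neg hnx, List.map_append, List.map_singleton]

theorem step_eq (d : PySem.Dict String Int) (k : String) :
    (if ¬ (PySem.Dict.contains d k) then PySem.Dict.insert d k 1
     else PySem.Dict.insert d k (PySem.Dict.getD d k 0 + 1)) =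
    PySem.Dict.insert d k (PySem.Dict.getD d k 0 + 1) := by
  by_cases h : PySem.Dict.contains d k
  · simp [h]
  · simp only [Bool.not_eq_true] at h
    rw [if_pos (by simp [h]), PySem.Dict.getD_of_not_contains d 0 h]
    norm_num

-- ===== VERDICT (by name: the statement is the Claim_ definition above) =====
theorem map_freqs_spec : Claim_equal_map_freqs := by
  intro s _
  unfold Spec_map_freqs map_freqs map_freqs_alt
  dsimp only
  have hstep : (fun (d : PySem.Dict String Int) char =>
      if PySem.Chars.isdigit char then
        if ¬ (PySem.Dict.contains d (String.ofList [char])) then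
          PySem.Dict.insert d (String.ofList [char]) 1
        else
          PySem.Dict.insert d (String.ofList [char]) (PySem.Dict.getD d (String.ofList [char]) 0 + 1)
      else d)
    = (fun d char =>
      if PySem.Chars.isdigit char then
        PySem.Dict.insert d (String.ofList [char]) (PySem.Dict.getD d (String.ofList [char]) 0 + 1)
      else d) := by
    funext d char
    by_cases h : PySem.Chars.isdigit char
    · simpa [h] using step_eq d (String.ofList [char])
    · simp [h]
  rw [hstep]
  have hD : (s.toList.foldl
      (fun d char => if PySem.Chars.isdigit char then
          PySem.Dict.insert d (String.ofList [char]) (PySem.Dict.getD d (String.ofList [char]) 0 + 1)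
        else d) PySem.Dict.empty)
    = PySem.Dict.counter
        ((s.toList.filter (fun c => PySem.Chars.isdigit c)).map (fun c => String.ofList [c])) := by
    rw [← PySem.Dict.foldl_insert_getD_add_one_eq_counter, List.foldl_map, List.foldl_filter]
  rw [hD, PySem.Dict.items_counter, ofList_map_single, List.map_map]
  simp only [PySem.List.dedup_eq_ofList]
  apply List.map_congr_left
  intro c _
  simp [Function.comp, List.count_map_of_injective _ _ singleChar_inj]
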